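-- pv_equiv track=rewrite | github.com/zcanann/FFCC-Decomp | tools/transform_dep.py | _normalize_slashes
-- ===== SOURCE A (Python) =====
-- _MAKE_ESCAPE_CHARS = {" ", "#", "$", ":"}
--
-- def _normalize_slashes(path: str) -> str:
--     """Convert Windows path separators while preserving Makefile escapes."""
--     out = []
--     idx = 0
--     while idx < len(path):
--         char = path[idx]
--         if char == "\\" and idx + 1 < len(path):
--             next_char = path[idx + 1]
--             if next_char in _MAKE_ESCAPE_CHARS:
--                 out.append(char)
--                 out.append(next_char)
--                 idx += 2
--                 continue
--             out.append("/")
--             idx += 1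
--             continue
--         out.append(char)
--         idx += 1
--     return "".join(out)
-- ===== SOURCE B (Python) =====
-- import re
--
-- def _normalize_slashes(path: str) -> str:
--     """Convert Windows path separators while preserving Makefile escapes."""
--     return re.sub(r'\\(?=[^ #$:])', '/', path)
-- ===== Notes on version B (the rewrite author's own statement) =====
-- stated objective: idiomatic
-- what changed: Replaced the manual index-based while loop with accumulator list by a single regex substitution using a positive lookahead, which converts a backslash to a forward slash only when the following character is not one of the Makefile escape characters (space, hash, dollar, colon), leaving escape pairs and a trailing backslash intact.
import Mathlib
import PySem

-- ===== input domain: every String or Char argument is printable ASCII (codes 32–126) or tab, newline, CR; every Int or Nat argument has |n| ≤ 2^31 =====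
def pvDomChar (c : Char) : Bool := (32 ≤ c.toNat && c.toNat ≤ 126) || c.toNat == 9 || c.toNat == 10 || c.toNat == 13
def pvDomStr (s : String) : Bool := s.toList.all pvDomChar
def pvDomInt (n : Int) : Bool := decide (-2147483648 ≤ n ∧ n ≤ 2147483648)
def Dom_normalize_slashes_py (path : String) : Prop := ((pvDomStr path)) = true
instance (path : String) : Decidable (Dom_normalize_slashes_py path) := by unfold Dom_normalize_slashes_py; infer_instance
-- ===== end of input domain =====

-- B replaces A's index-based while loop (consuming 1 or 2 chars, accumulator list) by one
-- regex substitution with a lookahead; same O(n) cost, more idiomatic.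

-- ===== PORT A =====
-- A's while loop over the index, transcribed as recursion over the remaining characters:
-- the escape branch consumes two characters (idx += 2), the other branches consume one.
def pvGoA : List Char → List Char
  | [] => []
  | c :: rest =>
    if c = '\\' then
      match rest with
      | n :: rest' =>
        if n = ' ' ∨ n = '#' ∨ n = '$' ∨ n = ':' then
          c :: n :: pvGoA rest'
        else
          '/' :: pvGoA (n :: rest')
      | [] => [c]          -- idx + 1 < len fails: fall through, append char
    else
      c :: pvGoA rest
termination_by l => l.length
decreasing_by all_goals simp

def normalize_slashes_py (path : String) : String :=
  String.ofList (pvGoA path.toList)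

-- ===== PORT B =====
-- re.sub(r'\\(?=[^ #$:])', '/', path): left-to-right scan; each match consumes exactly the
-- backslash (the lookahead is zero-width), so the scan advances one character at a time.
-- does the regex match at this position? ('\\' with the lookahead [^ #$:])
def pvMatch (c : Char) (rest : List Char) : Bool :=
  c = '\\' && (match rest with
              | n :: _ => !(n = ' ' || n = '#' || n = '$' || n = ':')
              | [] => false)

def pvGoB : List Char → List Char
  | [] => []
  | c :: rest => (if pvMatch c rest then '/' else c) :: pvGoB rest

def normalize_slashes_py_alt (path : String) : String :=
  String.ofList (pvGoB path.toList)

-- ===== PRECONDITION & SPEC =====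
def Spec_normalize_slashes_py (path : String) (out : String) : Prop := out = normalize_slashes_py_alt path
instance (path : String) (out : String) : Decidable (Spec_normalize_slashes_py path out) := by unfold Spec_normalize_slashes_py; infer_instance

-- ===== CLAIM (what is proved, stated in full; the proofs are below) =====
def Claim_equal_normalize_slashes_py : Prop := ∀ (path : String), Dom_normalize_slashes_py path → Spec_normalize_slashes_py path (normalize_slashes_py path)

-- ===== LEMMAS AND PROOFS =====

theorem pvGo_eq : ∀ (l : List Char), pvGoA l = pvGoB l := by
  intro l
  induction l using pvGoA.induct with
  | case1 => simp [pvGoA.eq_def, pvGoB]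
  | case2 n rest' hesc ih =>
    rcases hesc with h | h | h | h <;> subst h <;> simp_all [pvGoA, pvGoB, pvMatch]
  | case3 n rest' hesc ih =>
    simp_all [pvGoA, pvGoB, pvMatch]
  | case4 => simp [pvGoA, pvGoB, pvMatch]
  | case5 c rest hc ih =>
    rw [pvGoA.eq_def]
    simp [hc, ih, pvGoB, pvMatch]

-- ===== VERDICT (by name: the statement is the Claim_ definition above) =====
theorem normalize_slashes_py_spec : Claim_equal_normalize_slashes_py := by
  intro path _
  unfold Spec_normalize_slashes_py normalize_slashes_py normalize_slashes_py_alt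
  rw [pvGo_eq]
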